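-- pv_equiv track=rewrite | github.com/JMCLC/FP | Projetos/Jogo do Galo/jogo old.py | eh_posicao_livre
-- ===== SOURCE A (Python) =====
-- posicoes = {
--     'linha': ((1,2,3),(4,5,6),(7,8,9)),
--     'coluna': ((1,4,7),(2,5,8),(3,6,9)),
--     'diagonal': ((1,5,9),(7,5,3)),
-- }
--
-- def eh_tabuleiro(tuplo): # Duas maneiras de dar false e nao da
--     if len(tuplo) != 3 or type(tuplo) != tuple:
--         return False
--     for i in range(len(tuplo)):
--         for a in range(len(tuplo[i])):
--             if (type(tuplo[i][a]) != int) or (tuplo[i][a] not in (-1, 0, 1)) or (len(tuplo[i]) != 3 or type(tuplo[i]) != tuple):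
--                 return False
--     return True
--
-- def eh_posicao(posicao):
--     if type(posicao) != int:
--         return False
--     return 1 <= posicao <= 9
--
-- def transformar_posicao(linha, coluna):
--     return posicoes['linha'][linha][coluna]
--
-- def eh_posicao_livre(tuplo, posicao):
--     if (not eh_posicao(posicao) or type(posicao) != int) or (not eh_tabuleiro(tuplo) or type(tuplo) != tuple):
--         raise ValueError('eh_posicao_livre: algum dos argumentos e invalido')
--     a = 1
--     for i in range(len(tuplo)):
--         for a in range(len(tuplo[i])):
--             if transformar_posicao(i,a) == posicao and tuplo[i][a] == 0:
--                 return True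
--     return False
-- ===== SOURCE B (Python) =====
-- def eh_posicao_livre(tuplo, posicao):
--     valido = (type(posicao) == int and 1 <= posicao <= 9
--               and type(tuplo) == tuple and len(tuplo) == 3
--               and all(type(linha) == tuple and len(linha) == 3
--                       and all(type(c) == int and c in (-1, 0, 1) for c in linha)
--                       for linha in tuplo))
--     if not valido:
--         raise ValueError('eh_posicao_livre: algum dos argumentos e invalido')
--     celulas = tuplo[0] + tuplo[1] + tuplo[2]
--     return celulas[posicao - 1] == 0
-- ===== Notes on version B (the rewrite author's own statement) =====
-- stated objective: simpler
-- what changed: B validates the arguments in one boolean expression and then concatenates the three rows into a flat 9-cell tuple indexed directly with posicao-1, replacing A's nested row/column search through the posicoes['linha'] table via transformar_posicao.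
import Mathlib
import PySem

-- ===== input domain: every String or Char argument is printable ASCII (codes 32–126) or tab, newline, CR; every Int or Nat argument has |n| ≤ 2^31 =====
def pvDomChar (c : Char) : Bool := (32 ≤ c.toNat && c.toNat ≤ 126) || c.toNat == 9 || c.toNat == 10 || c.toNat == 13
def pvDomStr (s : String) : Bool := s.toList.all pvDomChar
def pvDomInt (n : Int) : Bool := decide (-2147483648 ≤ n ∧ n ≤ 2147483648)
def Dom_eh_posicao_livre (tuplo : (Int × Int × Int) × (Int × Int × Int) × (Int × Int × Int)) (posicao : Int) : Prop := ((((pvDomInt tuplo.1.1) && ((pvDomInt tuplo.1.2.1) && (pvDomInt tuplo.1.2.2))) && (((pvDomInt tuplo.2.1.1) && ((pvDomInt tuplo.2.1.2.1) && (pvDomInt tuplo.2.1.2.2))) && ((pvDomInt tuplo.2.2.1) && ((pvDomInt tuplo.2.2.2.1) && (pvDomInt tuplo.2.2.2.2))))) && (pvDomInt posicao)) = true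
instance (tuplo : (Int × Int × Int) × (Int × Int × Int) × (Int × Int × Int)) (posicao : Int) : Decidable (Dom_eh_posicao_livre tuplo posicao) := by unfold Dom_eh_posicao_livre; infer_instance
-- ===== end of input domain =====

-- B flattens the board into a 9-cell list and indexes it with posicao-1 (simpler), instead of A's nested search through the posicoes['linha'] table; the ValueError guard's accepted inputs are unchanged.
-- ===== PORT A =====
-- posicoes['linha'] table and transformar_posicao, as in the source
def pvTransformarPosicao (linha coluna : Int) : Int :=
  let row : Int × Int × Int :=
    if linha == 0 then (1, 2, 3) else if linha == 1 then (4, 5, 6) else (7, 8, 9)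
  if coluna == 0 then row.1 else if coluna == 1 then row.2.1 else row.2.2

def pvCell (tuplo : (Int × Int × Int) × (Int × Int × Int) × (Int × Int × Int)) (i a : Int) : Int :=
  let row := if i == 0 then tuplo.1 else if i == 1 then tuplo.2.1 else tuplo.2.2
  if a == 0 then row.1 else if a == 1 then row.2.1 else row.2.2

-- eh_tabuleiro: the tuple shape and int-ness are guaranteed by the Lean type,
-- so only the membership test 'tuplo[i][a] in (-1,0,1)' remains
def pvEhTabuleiro (tuplo : (Int × Int × Int) × (Int × Int × Int) × (Int × Int × Int)) : Bool :=
  (PySem.List.pyRange 0 3 1).all (fun i =>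
    (PySem.List.pyRange 0 3 1).all (fun a =>
      let v := pvCell tuplo i a
      v == -1 || v == 0 || v == 1))

def pvEhPosicao (posicao : Int) : Bool := 1 ≤ posicao && posicao ≤ 9

-- where the Python raises ValueError (outside Pre_) the port returns false
def eh_posicao_livre (tuplo : (Int × Int × Int) × (Int × Int × Int) × (Int × Int × Int)) (posicao : Int) : Bool :=
  if !pvEhPosicao posicao || !pvEhTabuleiro tuplo then false
  else
    (PySem.List.pyRange 0 3 1).any (fun i =>
      (PySem.List.pyRange 0 3 1).any (fun a =>
        pvTransformarPosicao i a == posicao && pvCell tuplo i a == 0))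

-- ===== PORT B =====
-- the board flattened row by row (tuplo[0] + tuplo[1] + tuplo[2])
def pvCelulas (tuplo : (Int × Int × Int) × (Int × Int × Int) × (Int × Int × Int)) : List Int :=
  [tuplo.1.1, tuplo.1.2.1, tuplo.1.2.2,
   tuplo.2.1.1, tuplo.2.1.2.1, tuplo.2.1.2.2,
   tuplo.2.2.1, tuplo.2.2.2.1, tuplo.2.2.2.2]

-- single validation expression, then a direct index into the flat cell list;
-- where the Python raises ValueError (outside Pre_) the port returns false
def eh_posicao_livre_alt (tuplo : (Int × Int × Int) × (Int × Int × Int) × (Int × Int × Int)) (posicao : Int) : Bool :=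
  let celulas := pvCelulas tuplo
  let valido := (1 ≤ posicao && posicao ≤ 9) &&
    celulas.all (fun c => c == -1 || c == 0 || c == 1)
  if !valido then false
  else
    match PySem.List.pyGet? celulas (posicao - 1) with
    | some v => v == 0
    | none => false

-- ===== PRECONDITION & SPEC =====
-- Pre_: exactly the inputs on which A returns normally (otherwise it raises ValueError):
-- posicao in 1..9 and every cell of the board in {-1, 0, 1}
def Pre_eh_posicao_livre (tuplo : (Int × Int × Int) × (Int × Int × Int) × (Int × Int × Int)) (posicao : Int) : Prop :=
  (1 ≤ posicao ∧ posicao ≤ 9) ∧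
  (∀ v ∈ [tuplo.1.1, tuplo.1.2.1, tuplo.1.2.2, tuplo.2.1.1, tuplo.2.1.2.1, tuplo.2.1.2.2,
          tuplo.2.2.1, tuplo.2.2.2.1, tuplo.2.2.2.2], v = -1 ∨ v = 0 ∨ v = 1)
instance (tuplo : (Int × Int × Int) × (Int × Int × Int) × (Int × Int × Int)) (posicao : Int) : Decidable (Pre_eh_posicao_livre tuplo posicao) := by unfold Pre_eh_posicao_livre; infer_instance

def pvWitness_eh_posicao_livre : ((Int × Int × Int) × (Int × Int × Int) × (Int × Int × Int)) × Int :=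
  (((0, 0, 0), (0, 0, 0), (0, 0, 0)), 5)

def Spec_eh_posicao_livre (tuplo : (Int × Int × Int) × (Int × Int × Int) × (Int × Int × Int)) (posicao : Int) (out : Bool) : Prop := out = eh_posicao_livre_alt tuplo posicao
instance (tuplo : (Int × Int × Int) × (Int × Int × Int) × (Int × Int × Int)) (posicao : Int) (out : Bool) : Decidable (Spec_eh_posicao_livre tuplo posicao out) := by unfold Spec_eh_posicao_livre; infer_instance

-- ===== CLAIM (what is proved, stated in full; the proofs are below) =====
def Claim_equal_eh_posicao_livre : Prop := ∀ (tuplo : (Int × Int × Int) × (Int × Int × Int) × (Int × Int × Int)) (posicao : Int), Dom_eh_posicao_livre tuplo posicao → Pre_eh_posicao_livre tuplo posicao → Spec_eh_posicao_livre tuplo posicao (eh_posicao_livre tuplo posicao)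

-- ===== LEMMAS AND PROOFS =====
theorem eh_posicao_livre_eq (tuplo : (Int × Int × Int) × (Int × Int × Int) × (Int × Int × Int)) (posicao : Int)
    (h1 : 1 ≤ posicao) (h2 : posicao ≤ 9) :
    eh_posicao_livre tuplo posicao = eh_posicao_livre_alt tuplo posicao := by
  obtain ⟨⟨a, b, c⟩, ⟨d, e, f⟩, g, h, i⟩ := tuplo
  interval_cases posicao <;>
    simp [eh_posicao_livre, eh_posicao_livre_alt, pvEhPosicao, pvEhTabuleiro, pvCell, pvCelulas,
      pvTransformarPosicao, PySem.List.pyRange, PySem.List.pyGet?, PySem.List.pyIdx?,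
      List.range_succ, List.any_cons, List.any_nil, Bool.and_assoc]

-- ===== VERDICT (by name: the statement is the Claim_ definition above) =====
theorem eh_posicao_livre_spec : Claim_equal_eh_posicao_livre := by
  intro tuplo posicao _ hpre
  exact eh_posicao_livre_eq tuplo posicao hpre.1.1 hpre.1.2
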